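-- pv_equiv track=rewrite | github.com/Adi058004/Law-Agent-by-Grok | working_enhanced_agent.py | _get_criminal_law_route
-- ===== SOURCE A (Python) =====
-- def _get_criminal_law_route(query: str) -> str:
--     """Get specific criminal law route based on crime type"""
--
--     query_lower = query.lower()
--
--     # Serious crimes requiring immediate action
--     if any(word in query_lower for word in ['rape', 'murder', 'kidnap', 'assault', 'violence']):
--         return "URGENT: Call 100 immediately, file FIR at nearest police station, seek medical help if needed"
--
--     # Theft and robbery
--     elif any(word in query_lower for word in ['robbery', 'theft', 'stolen', 'burglar']):
--         return "File FIR immediately at nearest police station, provide list of stolen items with values"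
--
--     # Fraud and cheating
--     elif any(word in query_lower for word in ['fraud', 'cheated', 'scam', 'deceived']):
--         return "File complaint with Economic Offences Wing, gather all transaction evidence and documents"
--
--     # Harassment cases
--     elif any(word in query_lower for word in ['harass', 'threaten', 'intimidat', 'stalk']):
--         return "File police complaint under IPC Section 506/509, document all incidents with evidence"
--
--     # Cyber crimes
--     elif any(word in query_lower for word in ['hacked', 'online', 'cyber', 'internet']):
--         return "Report to Cyber Crime Cell, file complaint on cybercrime.gov.in, preserve digital evidence"
--
--     # General criminal matters
--     else:
--         return "File police complaint (FIR) at nearest station, gather evidence, consult criminal lawyer"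
-- ===== SOURCE B (Python) =====
-- # B: flat keyword->priority map; one pass takes the MINIMUM priority among all
-- # matched keywords (group order encoded as numeric priority), then indexes an
-- # advice array. No if-elif ladder and no ordered group scan.
--
-- _PRIORITY = {
--     'rape': 0, 'murder': 0, 'kidnap': 0, 'assault': 0, 'violence': 0,
--     'robbery': 1, 'theft': 1, 'stolen': 1, 'burglar': 1,
--     'fraud': 2, 'cheated': 2, 'scam': 2, 'deceived': 2,
--     'harass': 3, 'threaten': 3, 'intimidat': 3, 'stalk': 3,
--     'hacked': 4, 'online': 4, 'cyber': 4, 'internet': 4,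
-- }
--
-- _ADVICE = [
--     "URGENT: Call 100 immediately, file FIR at nearest police station, seek medical help if needed",
--     "File FIR immediately at nearest police station, provide list of stolen items with values",
--     "File complaint with Economic Offences Wing, gather all transaction evidence and documents",
--     "File police complaint under IPC Section 506/509, document all incidents with evidence",
--     "Report to Cyber Crime Cell, file complaint on cybercrime.gov.in, preserve digital evidence",
--     "File police complaint (FIR) at nearest station, gather evidence, consult criminal lawyer",
-- ]
--
--
-- def _get_criminal_law_route(query: str) -> str:
--     query_lower = query.lower()
--     best = len(_ADVICE) - 1  # default: general criminal matters
--     for word, priority in _PRIORITY.items():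
--         if word in query_lower:
--             best = min(best, priority)
--     return _ADVICE[best]
-- ===== Notes on version B (the rewrite author's own statement) =====
-- stated objective: alternative
-- what changed: Replaced the ordered if-elif keyword-group ladder with a flat keyword-to-priority map scanned in one pass, taking the minimum matched priority and indexing an advice array; correct because the most-specific (earliest) group always wins as the numerically smallest priority.
import Mathlib
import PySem

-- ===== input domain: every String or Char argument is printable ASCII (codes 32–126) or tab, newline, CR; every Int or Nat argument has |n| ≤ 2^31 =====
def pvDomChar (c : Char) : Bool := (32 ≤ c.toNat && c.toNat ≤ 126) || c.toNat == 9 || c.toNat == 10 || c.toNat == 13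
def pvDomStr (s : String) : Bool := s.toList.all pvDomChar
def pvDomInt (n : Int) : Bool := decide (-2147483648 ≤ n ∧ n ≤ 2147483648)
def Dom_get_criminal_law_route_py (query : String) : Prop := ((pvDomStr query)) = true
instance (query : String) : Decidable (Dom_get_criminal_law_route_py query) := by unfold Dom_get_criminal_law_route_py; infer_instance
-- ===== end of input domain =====

-- B replaces A's ordered if-elif keyword-group ladder with a single pass over a flat
-- keyword->priority map taking the minimum matched priority, then indexing an advice array.


-- ===== PORT A =====
def get_criminal_law_route_py (query : String) : String :=
  let query_lower := PySem.Str.lower query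
  if ["rape", "murder", "kidnap", "assault", "violence"].any (fun word => PySem.Str.isIn word query_lower) then
    "URGENT: Call 100 immediately, file FIR at nearest police station, seek medical help if needed"
  else if ["robbery", "theft", "stolen", "burglar"].any (fun word => PySem.Str.isIn word query_lower) then
    "File FIR immediately at nearest police station, provide list of stolen items with values"
  else if ["fraud", "cheated", "scam", "deceived"].any (fun word => PySem.Str.isIn word query_lower) then
    "File complaint with Economic Offences Wing, gather all transaction evidence and documents"
  else if ["harass", "threaten", "intimidat", "stalk"].any (fun word => PySem.Str.isIn word query_lower) then
    "File police complaint under IPC Section 506/509, document all incidents with evidence"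
  else if ["hacked", "online", "cyber", "internet"].any (fun word => PySem.Str.isIn word query_lower) then
    "Report to Cyber Crime Cell, file complaint on cybercrime.gov.in, preserve digital evidence"
  else
    "File police complaint (FIR) at nearest station, gather evidence, consult criminal lawyer"

-- ===== PORT B =====
-- flat keyword -> priority map, in dict insertion order (= Source B's _PRIORITY)
def pvPriority : List (String × Nat) :=
  [("rape", 0), ("murder", 0), ("kidnap", 0), ("assault", 0), ("violence", 0),
   ("robbery", 1), ("theft", 1), ("stolen", 1), ("burglar", 1),
   ("fraud", 2), ("cheated", 2), ("scam", 2), ("deceived", 2),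
   ("harass", 3), ("threaten", 3), ("intimidat", 3), ("stalk", 3),
   ("hacked", 4), ("online", 4), ("cyber", 4), ("internet", 4)]

def pvAdvice : List String :=
  ["URGENT: Call 100 immediately, file FIR at nearest police station, seek medical help if needed",
   "File FIR immediately at nearest police station, provide list of stolen items with values",
   "File complaint with Economic Offences Wing, gather all transaction evidence and documents",
   "File police complaint under IPC Section 506/509, document all incidents with evidence",
   "Report to Cyber Crime Cell, file complaint on cybercrime.gov.in, preserve digital evidence",
   "File police complaint (FIR) at nearest station, gather evidence, consult criminal lawyer"]

-- the loop body: keep the minimum priority among matched keywords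
def pvStep (query_lower : String) (best : Nat) (wp : String × Nat) : Nat :=
  if PySem.Str.isIn wp.1 query_lower then min best wp.2 else best

def get_criminal_law_route_py_alt (query : String) : String :=
  let query_lower := PySem.Str.lower query
  let best := pvPriority.foldl (pvStep query_lower) (pvAdvice.length - 1)
  -- _ADVICE[best]: best is always < pvAdvice.length (proved below), so plain getD is exact
  pvAdvice.getD best ""

-- ===== PRECONDITION & SPEC =====
def Spec_get_criminal_law_route_py (query : String) (out : String) : Prop := out = get_criminal_law_route_py_alt query
instance (query : String) (out : String) : Decidable (Spec_get_criminal_law_route_py query out) := by unfold Spec_get_criminal_law_route_py; infer_instance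

-- ===== CLAIM (what is proved, stated in full; the proofs are below) =====
def Claim_equal_get_criminal_law_route_py : Prop := ∀ (query : String), Dom_get_criminal_law_route_py query → Spec_get_criminal_law_route_py query (get_criminal_law_route_py query)

-- ===== LEMMAS AND PROOFS =====

-- folding one keyword group of constant priority k is: min with k if any keyword matches
theorem pvFold_g0 (q : String) (a : Nat) :
    List.foldl (pvStep q) a [("rape", 0), ("murder", 0), ("kidnap", 0), ("assault", 0), ("violence", 0)]
      = if ["rape", "murder", "kidnap", "assault", "violence"].any (fun w => PySem.Str.isIn w q) then min a 0 else a := by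
  simp only [List.foldl, List.any_cons, List.any_nil, Bool.or_false, pvStep]
  split_ifs <;> simp_all <;> omega

theorem pvFold_g1 (q : String) (a : Nat) :
    List.foldl (pvStep q) a [("robbery", 1), ("theft", 1), ("stolen", 1), ("burglar", 1)]
      = if ["robbery", "theft", "stolen", "burglar"].any (fun w => PySem.Str.isIn w q) then min a 1 else a := by
  simp only [List.foldl, List.any_cons, List.any_nil, Bool.or_false, pvStep]
  split_ifs <;> simp_all <;> omega

theorem pvFold_g2 (q : String) (a : Nat) :
    List.foldl (pvStep q) a [("fraud", 2), ("cheated", 2), ("scam", 2), ("deceived", 2)]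
      = if ["fraud", "cheated", "scam", "deceived"].any (fun w => PySem.Str.isIn w q) then min a 2 else a := by
  simp only [List.foldl, List.any_cons, List.any_nil, Bool.or_false, pvStep]
  split_ifs <;> simp_all <;> omega

theorem pvFold_g3 (q : String) (a : Nat) :
    List.foldl (pvStep q) a [("harass", 3), ("threaten", 3), ("intimidat", 3), ("stalk", 3)]
      = if ["harass", "threaten", "intimidat", "stalk"].any (fun w => PySem.Str.isIn w q) then min a 3 else a := by
  simp only [List.foldl, List.any_cons, List.any_nil, Bool.or_false, pvStep]
  split_ifs <;> simp_all <;> omega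

theorem pvFold_g4 (q : String) (a : Nat) :
    List.foldl (pvStep q) a [("hacked", 4), ("online", 4), ("cyber", 4), ("internet", 4)]
      = if ["hacked", "online", "cyber", "internet"].any (fun w => PySem.Str.isIn w q) then min a 4 else a := by
  simp only [List.foldl, List.any_cons, List.any_nil, Bool.or_false, pvStep]
  split_ifs <;> simp_all <;> omega

-- ===== VERDICT (by name: the statement is the Claim_ definition above) =====
theorem get_criminal_law_route_py_spec : Claim_equal_get_criminal_law_route_py := by
  intro query _
  unfold Spec_get_criminal_law_route_py get_criminal_law_route_py get_criminal_law_route_py_alt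
  set q := PySem.Str.lower query with hq
  have hsplit : pvPriority =
      [("rape", 0), ("murder", 0), ("kidnap", 0), ("assault", 0), ("violence", 0)] ++
      [("robbery", 1), ("theft", 1), ("stolen", 1), ("burglar", 1)] ++
      [("fraud", 2), ("cheated", 2), ("scam", 2), ("deceived", 2)] ++
      [("harass", 3), ("threaten", 3), ("intimidat", 3), ("stalk", 3)] ++
      [("hacked", 4), ("online", 4), ("cyber", 4), ("internet", 4)] := by rfl
  simp only [hsplit, List.foldl_append, pvFold_g0, pvFold_g1, pvFold_g2, pvFold_g3, pvFold_g4]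
  by_cases h0 : ["rape", "murder", "kidnap", "assault", "violence"].any (fun w => PySem.Str.isIn w q) = true <;>
  by_cases h1 : ["robbery", "theft", "stolen", "burglar"].any (fun w => PySem.Str.isIn w q) = true <;>
  by_cases h2 : ["fraud", "cheated", "scam", "deceived"].any (fun w => PySem.Str.isIn w q) = true <;>
  by_cases h3 : ["harass", "threaten", "intimidat", "stalk"].any (fun w => PySem.Str.isIn w q) = true <;>
  by_cases h4 : ["hacked", "online", "cyber", "internet"].any (fun w => PySem.Str.isIn w q) = true <;>
  simp only [List.any_cons, List.any_nil, Bool.or_false, Bool.or_eq_true] at h0 h1 h2 h3 h4 ⊢ <;>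
  simp_all [pvAdvice]
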